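-- pv_equiv track=rewrite | github.com/lexibank/pytlopo | src/pytlopo/parse.py | formblock
-- ===== SOURCE A (Python) =====
-- CF_LINE_PREFIX = 'cf. also'
--
-- def formblock(lines):
--     reg, cfs = [], []
--     in_cf, cf, cfspec = False, [], None
--
--     for line in lines:
--         if line.strip().startswith(CF_LINE_PREFIX):
--             in_cf = True
--             if cf:  # There's already a previous cf block.
--                 cfs.append((cfspec, cf))
--             cf = []
--             cfspec = line.replace(CF_LINE_PREFIX, '').strip().lstrip(':').strip()
--             continue
--         if in_cf:
--             cf.append(line)
--         else:
--             reg.append(line)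
--     if cf:
--         cfs.append((cfspec, cf))
--     return reg, cfs
-- ===== SOURCE B (Python) =====
-- CF_LINE_PREFIX = 'cf. also'
--
-- def formblock(lines):
--     def is_hdr(line):
--         return line.strip().startswith(CF_LINE_PREFIX)
--
--     k = 0
--     while k < len(lines) and not is_hdr(lines[k]):
--         k += 1
--     reg, rest = lines[:k], lines[k:]
--
--     cfs = []
--     while rest:
--         hdr, tail = rest[0], rest[1:]
--         j = 0
--         while j < len(tail) and not is_hdr(tail[j]):
--             j += 1
--         block, rest = tail[:j], tail[j:]
--         if block:
--             spec = hdr.replace(CF_LINE_PREFIX, '').strip().lstrip(':').strip()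
--             cfs.append((spec, block))
--     return reg, cfs
-- ===== Notes on version B (the rewrite author's own statement) =====
-- stated objective: alternative
-- what changed: Replaces A's single pass with five pieces of mutable state (in_cf flag, pending block, pending spec) by a span decomposition: take the regular prefix up to the first 'cf. also' header, then repeatedly slice off one header and its block, appending (spec, block) only when the block is non-empty.
import Mathlib
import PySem

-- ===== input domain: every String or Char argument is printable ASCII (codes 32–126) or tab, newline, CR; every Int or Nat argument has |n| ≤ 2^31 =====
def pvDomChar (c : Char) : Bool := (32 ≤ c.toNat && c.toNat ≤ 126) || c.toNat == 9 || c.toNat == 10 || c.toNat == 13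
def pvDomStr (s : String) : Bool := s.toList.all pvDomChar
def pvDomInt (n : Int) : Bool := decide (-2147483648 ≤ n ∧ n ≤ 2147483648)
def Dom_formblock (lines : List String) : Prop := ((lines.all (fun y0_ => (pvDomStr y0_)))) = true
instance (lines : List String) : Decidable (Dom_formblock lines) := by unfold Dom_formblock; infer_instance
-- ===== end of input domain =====

-- B replaces A's five-variable stateful single pass by a span decomposition (regular prefix,
-- then one slice per header block); objective: alternative, same behaviour on all inputs.

-- shared helpers (both Pythons contain these very expressions)
def pvCfPrefix : String := "cf. also"

-- line.strip().startswith(CF_LINE_PREFIX)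
def pvIsHeader (line : String) : Bool :=
  PySem.Str.startswith (PySem.Str.strip line) pvCfPrefix

-- line.replace(CF_LINE_PREFIX, '').strip().lstrip(':').strip()
-- str.lstrip(':') drops exactly the leading ':' characters — ported by hand (exact)
def pvSpec (line : String) : String :=
  PySem.Str.strip (String.ofList (((PySem.Str.strip (PySem.Str.replace line pvCfPrefix "")).toList).dropWhile (fun c => c == ':')))

-- ===== PORT A =====
-- state = (reg, cfs, in_cf, cf, cfspec); Python's cfspec starts as None → Option String
-- (the .getD "" default is never read: cf ≠ [] only after a header set cfspec)
def formblockStep (st : List String × List (String × List String) × Bool × List String × Option String)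
    (line : String) : List String × List (String × List String) × Bool × List String × Option String :=
  match st with
  | (reg, cfs, in_cf, cf, cfspec) =>
    if pvIsHeader line then
      (reg, (if !cf.isEmpty then cfs ++ [(cfspec.getD "", cf)] else cfs), true, [], some (pvSpec line))
    else if in_cf then
      (reg, cfs, in_cf, cf ++ [line], cfspec)
    else
      (reg ++ [line], cfs, in_cf, cf, cfspec)

def formblock (lines : List String) : List String × (List (String × List String)) :=
  match lines.foldl formblockStep ([], [], false, [], none) with
  | (reg, cfs, _, cf, cfspec) =>
    (reg, if !cf.isEmpty then cfs ++ [(cfspec.getD "", cf)] else cfs)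

-- ===== PORT B =====
-- the inner while loop of B: rest = hdr :: tail; block = tail[:j], next rest = tail[j:]
def pvGroups : List String → List (String × List String)
  | [] => []
  | hdr :: tail =>
    let block := tail.takeWhile (fun l => !pvIsHeader l)
    let rest := tail.drop block.length
    (if block.isEmpty then [] else [(pvSpec hdr, block)]) ++ pvGroups rest
termination_by r => r.length
decreasing_by simp [List.length_drop]

def formblock_alt (lines : List String) : List String × (List (String × List String)) :=
  let reg := lines.takeWhile (fun l => !pvIsHeader l)
  let rest := lines.dropWhile (fun l => !pvIsHeader l)
  (reg, pvGroups rest)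

-- ===== PRECONDITION & SPEC =====
def Spec_formblock (lines : List String) (out : List String × (List (String × List String))) : Prop := out = formblock_alt lines
instance (lines : List String) (out : List String × (List (String × List String))) : Decidable (Spec_formblock lines out) := by unfold Spec_formblock; infer_instance

-- ===== CLAIM (what is proved, stated in full; the proofs are below) =====
def Claim_equal_formblock : Prop := ∀ (lines : List String), Dom_formblock lines → Spec_formblock lines (formblock lines)

-- ===== LEMMAS AND PROOFS =====

def pvFinish (st : List String × List (String × List String) × Bool × List String × Option String) :
    List String × (List (String × List String)) :=
  match st with
  | (reg, cfs, _, cf, cfspec) =>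
    (reg, if !cf.isEmpty then cfs ++ [(cfspec.getD "", cf)] else cfs)

theorem drop_length_takeWhile (p : String → Bool) (l : List String) :
    l.drop (l.takeWhile p).length = l.dropWhile p := by
  induction l with
  | nil => rfl
  | cons a t ih =>
    by_cases h : p a
    · simp [h, ih]
    · simp [h]

theorem pvGroups_nil : pvGroups [] = [] := by rw [pvGroups]

theorem pvGroups_cons (hdr : String) (tail : List String) :
    pvGroups (hdr :: tail) =
      (if (tail.takeWhile (fun l => !pvIsHeader l)).isEmpty then []
       else [(pvSpec hdr, tail.takeWhile (fun l => !pvIsHeader l))]) ++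
      pvGroups (tail.dropWhile (fun l => !pvIsHeader l)) := by
  rw [pvGroups, drop_length_takeWhile]

-- in-cf mode: the fold continued from state (reg, cfs, true, cf, some sp)
theorem foldA_incf (lines : List String) (reg : List String)
    (cfs : List (String × List String)) (cf : List String) (sp : String) :
    pvFinish (lines.foldl formblockStep (reg, cfs, true, cf, some sp)) =
      (reg, cfs ++
        (if (cf ++ lines.takeWhile (fun l => !pvIsHeader l)).isEmpty then []
         else [(sp, cf ++ lines.takeWhile (fun l => !pvIsHeader l))]) ++
        pvGroups (lines.dropWhile (fun l => !pvIsHeader l))) := by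
  induction lines generalizing cfs cf sp with
  | nil =>
    simp only [List.foldl_nil, pvFinish, List.takeWhile_nil, List.append_nil, List.dropWhile_nil, pvGroups_nil]
    by_cases h : cf.isEmpty <;> simp [h]
  | cons l ls ih =>
    by_cases h : pvIsHeader l
    · rw [List.foldl_cons]
      have hstep : formblockStep (reg, cfs, true, cf, some sp) l =
          (reg, (if !cf.isEmpty then cfs ++ [(sp, cf)] else cfs), true, [], some (pvSpec l)) := by
        simp [formblockStep, h]
      rw [hstep, ih]
      have htw : (l :: ls).takeWhile (fun l => !pvIsHeader l) = [] := by
        simp [h]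
      have hdw : (l :: ls).dropWhile (fun l => !pvIsHeader l) = l :: ls := by
        simp [h]
      rw [htw, hdw]
      rw [pvGroups_cons]
      by_cases hc : cf.isEmpty <;> simp [hc]
    · rw [List.foldl_cons]
      have hstep : formblockStep (reg, cfs, true, cf, some sp) l =
          (reg, cfs, true, cf ++ [l], some sp) := by
        simp [formblockStep, h]
      rw [hstep, ih]
      have htw : (l :: ls).takeWhile (fun l => !pvIsHeader l) =
          l :: ls.takeWhile (fun l => !pvIsHeader l) := by simp [h]
      have hdw : (l :: ls).dropWhile (fun l => !pvIsHeader l) =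
          ls.dropWhile (fun l => !pvIsHeader l) := by simp [h]
      rw [htw, hdw]
      simp

-- regular mode: the fold from state (reg, cfs, false, [], o)
theorem foldA_reg (lines : List String) (reg : List String)
    (cfs : List (String × List String)) (o : Option String) :
    pvFinish (lines.foldl formblockStep (reg, cfs, false, [], o)) =
      (reg ++ lines.takeWhile (fun l => !pvIsHeader l),
       cfs ++ pvGroups (lines.dropWhile (fun l => !pvIsHeader l))) := by
  induction lines generalizing reg with
  | nil => simp [pvFinish, pvGroups_nil]
  | cons l ls ih =>
    by_cases h : pvIsHeader l
    · rw [List.foldl_cons]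
      have hstep : formblockStep (reg, cfs, false, [], o) l =
          (reg, cfs, true, [], some (pvSpec l)) := by
        simp [formblockStep, h]
      rw [hstep, foldA_incf]
      have htw : (l :: ls).takeWhile (fun l => !pvIsHeader l) = [] := by
        simp [h]
      have hdw : (l :: ls).dropWhile (fun l => !pvIsHeader l) = l :: ls := by
        simp [h]
      rw [htw, hdw]
      rw [pvGroups_cons]
      simp
    · rw [List.foldl_cons]
      have hstep : formblockStep (reg, cfs, false, [], o) l =
          (reg ++ [l], cfs, false, [], o) := by
        simp [formblockStep, h]
      rw [hstep, ih]
      simp [h]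

-- ===== VERDICT (by name: the statement is the Claim_ definition above) =====
theorem formblock_spec : Claim_equal_formblock := by
  intro lines _
  unfold Spec_formblock formblock formblock_alt
  have := foldA_reg lines [] [] none
  simp [pvFinish] at this
  rw [this.1] at *
  cases hst : lines.foldl formblockStep ([], [], false, [], none) with
  | mk r rest =>
    have h2 := foldA_reg lines [] [] none
    rw [hst] at h2
    simp [pvFinish] at h2
    obtain ⟨c1, c2, c3, c4⟩ := rest
    simp_all
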